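-- pv_equiv track=rewrite | github.com/Antonio-III/Python | OC/Problems/Math/_04_algebra1.py | __separate_terms
-- ===== SOURCE A (Python) =====
-- def __separate_terms(exp: str):
--     exp_l = len(exp)
--
--     terms = []
--     sub_term = []
--
--     start = 0
--     end = 0
--
--     for i in range(exp_l):
--         # At start of expression, append the starting term
--         if i == 0:
--             start = i
--             sub_term.append(start)
--
--         # In the middle, append the ending of the initial term,
--         # and append the new starting term
--         elif (exp[i] == "+") or (exp[i] == "-"):
--             start = end = i
--             sub_term.append(end)
--
--             if (len(sub_term) == 2):
--                 terms.append(sub_term)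
--
--                 sub_term = []
--
--                 sub_term.append(start)
--
--         # At the end, append the last term's substring
--         if i+1 == exp_l:
--             sub_term.append(exp_l)
--             terms.append(sub_term)
--
--     return terms
-- ===== SOURCE B (Python) =====
-- def __separate_terms(exp: str):
--     # Recursive descent: each call emits one term by scanning forward to the
--     # next '+'/'-' sign (a sign at index 0 never starts a cut, since the scan
--     # begins at start + 1), then recurses from that cut point.
--     n = len(exp)
--
--     def go(start):
--         j = start + 1
--         while j < n and exp[j] not in "+-":
--             j += 1
--         if j < n:
--             return [[start, j]] + go(j)
--         return [[start, n]]
--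
--     return go(0) if n else []
-- ===== Notes on version B (the rewrite author's own statement) =====
-- stated objective: alternative
-- what changed: A's single stateful left-to-right fold carrying (terms, sub_term, start, end) with in-loop list splicing is replaced by a recursive descent: each recursive call scans forward to the next '+'/'-' sign, emits one complete [start, cut] term, and recurses from the cut.
import Mathlib
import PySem

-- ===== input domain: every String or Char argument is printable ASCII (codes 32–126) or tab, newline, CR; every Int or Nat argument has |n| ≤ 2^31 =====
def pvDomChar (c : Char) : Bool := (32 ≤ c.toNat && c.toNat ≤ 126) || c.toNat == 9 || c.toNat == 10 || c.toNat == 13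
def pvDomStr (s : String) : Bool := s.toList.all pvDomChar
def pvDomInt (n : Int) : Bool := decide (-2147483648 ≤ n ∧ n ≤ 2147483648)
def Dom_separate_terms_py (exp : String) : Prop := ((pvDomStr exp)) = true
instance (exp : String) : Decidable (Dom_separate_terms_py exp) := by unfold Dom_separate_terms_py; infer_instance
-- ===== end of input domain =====

-- B replaces A's stateful single fold (terms/sub_term/start/end juggling) by a recursive
-- descent that emits one [start, cut] term per call and recurses from the cut — an
-- alternative decomposition of the same O(n) task.

-- ===== PORT A =====
-- the body of A's for-loop; state = (terms, sub_term, start, end)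
def separate_terms_step (cs : List Char) (exp_l : Int)
    (st : List (List Int) × List Int × Int × Int) (i : Int) :
    List (List Int) × List Int × Int × Int :=
  let terms := st.1
  let sub_term := st.2.1
  let start := st.2.2.1
  let end_ := st.2.2.2
  let st1 :=
    if i = 0 then
      (terms, sub_term ++ [i], i, end_)
    else if (PySem.List.pyGetD cs i ' ' == '+') || (PySem.List.pyGetD cs i ' ' == '-') then
      -- start = end = i; sub_term.append(end)
      let sub_term' := sub_term ++ [i]
      if sub_term'.length = 2 then
        (terms ++ [sub_term'], ([i] : List Int), i, i)
      else
        (terms, sub_term', i, i)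
    else (terms, sub_term, start, end_)
  -- if i+1 == exp_l: sub_term.append(exp_l); terms.append(sub_term)
  if i + 1 = exp_l then
    (st1.1 ++ [st1.2.1 ++ [exp_l]], st1.2.1 ++ [exp_l], st1.2.2.1, st1.2.2.2)
  else st1

def separate_terms_py (exp : String) : List (List Int) :=
  let cs := exp.toList
  let exp_l : Int := cs.length
  ((PySem.List.pyRange 0 exp_l).foldl (separate_terms_step cs exp_l)
    ([], [], 0, 0)).1

-- ===== PORT B =====
-- the inner while loop of Source B's go: advance j past non-sign characters
def stFindCut (cs : List Char) (j : Nat) : Nat :=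
  if _h : j < cs.length then
    if cs.getD j ' ' == '+' || cs.getD j ' ' == '-' then j
    else stFindCut cs (j + 1)
  else j
termination_by cs.length - j

-- termination fact for stGo (cited by decreasing_by below)
theorem stFindCut_ge (cs : List Char) : ∀ (j : Nat), j ≤ stFindCut cs j := by
  intro j
  rw [stFindCut]
  split
  · split
    · exact le_refl _
    · exact le_trans (Nat.le_succ j) (stFindCut_ge cs (j + 1))
  · exact le_refl _
termination_by j => cs.length - j
decreasing_by omega

-- Source B's go: emit one term per call, recurse from the cut
def stGo (cs : List Char) (start : Nat) : List (List Int) :=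
  let j := stFindCut cs (start + 1)
  if _h : j < cs.length then
    [[(start : Int), (j : Int)]] ++ stGo cs j
  else [[(start : Int), (cs.length : Int)]]
termination_by cs.length - start
decreasing_by
  have := stFindCut_ge cs (start + 1)
  omega

def separate_terms_py_alt (exp : String) : List (List Int) :=
  let cs := exp.toList
  if cs.length ≠ 0 then stGo cs 0 else []

-- ===== PRECONDITION & SPEC =====
def Spec_separate_terms_py (exp : String) (out : List (List Int)) : Prop := out = separate_terms_py_alt exp
instance (exp : String) (out : List (List Int)) : Decidable (Spec_separate_terms_py exp out) := by unfold Spec_separate_terms_py; infer_instance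

-- ===== CLAIM (what is proved, stated in full; the proofs are below) =====
def Claim_equal_separate_terms_py : Prop := ∀ (exp : String), Dom_separate_terms_py exp → Spec_separate_terms_py exp (separate_terms_py exp)

-- ===== LEMMAS AND PROOFS =====

-- Python: exp[i] in "+-", as a test on an Int index (used to characterise both ports)
def separate_terms_isSplit (cs : List Char) (i : Int) : Bool :=
  (PySem.List.pyGetD cs i ' ' == '+') || (PySem.List.pyGetD cs i ' ' == '-')

-- adjacent pairs of a cut-point list (the common characterisation of both ports)
def zp (q : List Int) : List (List Int) := List.zipWith (fun a b => [a, b]) q (q.drop 1)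

theorem zp_cons2 (a b : Int) (t : List Int) : zp (a :: b :: t) = [a, b] :: zp (b :: t) := rfl

theorem zp_concat : ∀ (f : List Int) (l x : Int),
    zp (f ++ l :: [x]) = zp (f ++ [l]) ++ [[l, x]] := by
  intro f
  induction f with
  | nil => intro l x; rfl
  | cons a f ih =>
    intro l x
    cases f with
    | nil => rfl
    | cons b f =>
      simp only [List.cons_append] at ih ⊢
      rw [zp_cons2, zp_cons2, ih]
      simp

-- loop invariant for the middle indices (no i = 0, no i + 1 = exp_l)
theorem foldl_mid (cs : List Char) (n : Int) :
    ∀ (L : List Int), (∀ i ∈ L, i ≠ 0 ∧ i + 1 ≠ n) →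
    ∀ (front : List Int) (l s e : Int), ∃ front' l' s' e',
      front' ++ [l'] = front ++ l :: L.filter (separate_terms_isSplit cs) ∧
      L.foldl (separate_terms_step cs n) (zp (front ++ [l]), [l], s, e) =
        (zp (front' ++ [l']), [l'], s', e') := by
  intro L
  induction L with
  | nil =>
    intro _ front l s e
    exact ⟨front, l, s, e, by simp, rfl⟩
  | cons i L ih =>
    intro h front l s e
    obtain ⟨hi0, hin⟩ := h i (List.mem_cons_self ..)
    have hL := fun j hj => h j (List.mem_cons_of_mem _ hj)
    by_cases hp : separate_terms_isSplit cs i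
    · -- split index: close the open term, start a new one
      have hp' : (PySem.List.pyGetD cs i ' ' = '+' ∨ PySem.List.pyGetD cs i ' ' = '-') := by
        simpa [separate_terms_isSplit] using hp
      have hstep : separate_terms_step cs n (zp (front ++ [l]), [l], s, e) i
          = (zp ((front ++ [l]) ++ [i]), [i], i, i) := by
        simp [separate_terms_step, hi0, hin, hp', zp_concat]
      obtain ⟨front', l', s', e', heq, hrec⟩ := ih hL (front ++ [l]) i i i
      refine ⟨front', l', s', e', ?_, ?_⟩
      · rw [heq]; simp [hp]
      · simp only [List.foldl_cons, hstep, hrec]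
    · -- not a split index: state unchanged
      have hstep : separate_terms_step cs n (zp (front ++ [l]), [l], s, e) i
          = (zp (front ++ [l]), [l], s, e) := by
        simp only [separate_terms_isSplit, Bool.or_eq_true, beq_iff_eq, not_or] at hp
        simp [separate_terms_step, hi0, hin] at hp ⊢
        exact hp
      obtain ⟨front', l', s', e', heq, hrec⟩ := ih hL front l s e
      refine ⟨front', l', s', e', ?_, ?_⟩
      · rw [heq]; simp [hp]
      · simp only [List.foldl_cons, hstep, hrec]

-- the whole A loop, for strings of length ≥ 2
theorem core (c c2 : Char) (rest : List Char) :
    ((PySem.List.pyRange 0 ((c :: c2 :: rest).length : Int)).foldl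
        (separate_terms_step (c :: c2 :: rest) ((c :: c2 :: rest).length : Int)) ([], [], 0, 0)).1
      = zp (0 :: ((PySem.List.pyRange 1 ((c :: c2 :: rest).length : Int)).filter
          (separate_terms_isSplit (c :: c2 :: rest)) ++ [((c :: c2 :: rest).length : Int)])) := by
  have hn2 : (2:Int) ≤ ((c :: c2 :: rest).length : Int) := by
    simp only [List.length_cons]
    push_cast
    omega
  generalize (c :: c2 :: rest) = cs at *
  generalize hn : ((cs.length : Int)) = n at *
  have h0n : (0:Int) < n := by omega
  have h1n : (1:Int) ≤ n - 1 := by omega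
  have hsplit : PySem.List.pyRange 1 n = PySem.List.pyRange 1 (n-1) ++ [n-1] := by
    have h := PySem.List.pyRange_one_succ_right (a := 1) (b := n - 1) h1n
    have h' : n - 1 + 1 = n := by omega
    rw [h'] at h
    exact h
  rw [PySem.List.pyRange_one_cons h0n, hsplit, List.foldl_cons]
  simp only [zero_add, hsplit]
  rw [List.foldl_append]
  have hstep0 : separate_terms_step cs n ([], [], 0, 0) 0 = (zp ([] ++ [0]), [(0:Int)], 0, 0) := by
    have h1 : ¬ ((1:Int) = n) := by omega
    simp [separate_terms_step, h1, zp]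
  rw [hstep0]
  obtain ⟨front', l', s', e', heq, hrec⟩ :=
    foldl_mid cs n (PySem.List.pyRange 1 (n-1))
      (fun i hi => by
        have := PySem.List.mem_pyRange_one.mp hi
        exact ⟨by omega, by omega⟩)
      [] 0 0 0
  rw [hrec]
  simp only [List.nil_append] at heq
  have hne : ¬ (n - 1 = 0) := by omega
  have hend : n - 1 + 1 = n := by omega
  by_cases hq : separate_terms_isSplit cs (n-1)
  · have hp' : (PySem.List.pyGetD cs (n-1) ' ' = '+' ∨ PySem.List.pyGetD cs (n-1) ' ' = '-') := by
      simpa [separate_terms_isSplit] using hq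
    have hstepL : separate_terms_step cs n (zp (front' ++ [l']), [l'], s', e') (n-1)
        = (zp (front' ++ [l']) ++ [[l', n-1]] ++ [[n-1, n]], [n-1, n], n-1, n-1) := by
      simp [separate_terms_step, hne, hend, hp']
    rw [List.foldl_cons, List.foldl_nil, hstepL]
    have e2 := zp_concat front' l' (n-1)
    have e1 := zp_concat (front' ++ [l']) (n-1) n
    simp only [List.filter_append, List.filter_cons, List.filter_nil, hq, if_pos,
      List.append_assoc, List.cons_append, List.nil_append] at *
    rw [← List.cons_append, ← heq]
    simp only [List.append_assoc, List.cons_append, List.nil_append]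
    rw [e1, e2]
    simp
  · have hqc : ¬ PySem.List.pyGetD cs (n-1) ' ' = '+' ∧ ¬ PySem.List.pyGetD cs (n-1) ' ' = '-' := by
      simp only [separate_terms_isSplit, Bool.or_eq_true, beq_iff_eq, not_or] at hq
      exact hq
    have hstepL : separate_terms_step cs n (zp (front' ++ [l']), [l'], s', e') (n-1)
        = (zp (front' ++ [l']) ++ [[l', n]], [l', n], s', e') := by
      simp [separate_terms_step, hne, hend, hqc.1, hqc.2]
    rw [List.foldl_cons, List.foldl_nil, hstepL]
    have e2 := zp_concat front' l' n
    simp only [List.filter_append, List.filter_cons, List.filter_nil, hq, Bool.false_eq_true,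
      if_false, List.append_nil, List.nil_append] at *
    rw [← List.cons_append, ← heq]
    simp only [List.append_assoc, List.cons_append, List.nil_append]
    rw [e2]

-- characterisation of the while loop: stFindCut returns the first sign index ≥ j (or ≥ length)
theorem stFindCut_spec (cs : List Char) : ∀ (d j : Nat), cs.length - j ≤ d →
    stFindCut cs j ≤ cs.length ∨ stFindCut cs j = j := by
  intro d
  induction d with
  | zero =>
    intro j h
    rw [stFindCut]
    split
    · omega
    · exact Or.inr rfl
  | succ d ih =>
    intro j h
    rw [stFindCut]
    split
    · split
      · omega
      · rcases ih (j+1) (by omega) with h' | h'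
        · exact Or.inl h'
        · rw [h']; omega
    · exact Or.inr rfl

theorem stFindCut_le (cs : List Char) (j : Nat) (hj : j ≤ cs.length) :
    stFindCut cs j ≤ cs.length := by
  rcases stFindCut_spec cs (cs.length - j) j (le_refl _) with h | h
  · exact h
  · omega

theorem stFindCut_no_split (cs : List Char) : ∀ (d j : Nat), cs.length - j ≤ d →
    ∀ m, j ≤ m → m < stFindCut cs j → separate_terms_isSplit cs (m : Int) = false := by
  intro d
  induction d with
  | zero =>
    intro j h m hm1 hm2
    have := stFindCut_ge cs j
    rw [stFindCut] at hm2
    split at hm2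
    · omega
    · omega
  | succ d ih =>
    intro j h m hm1 hm2
    rw [stFindCut] at hm2
    split at hm2
    · rename_i hjl
      split at hm2
      · omega
      · rename_i hns
        rcases Nat.eq_or_lt_of_le hm1 with rfl | hlt
        · simp only [separate_terms_isSplit]
          rw [PySem.List.pyGetD_natCast]
          simpa using hns
        · exact ih (j+1) (by omega) m hlt hm2
    · omega

theorem stFindCut_split (cs : List Char) : ∀ (d j : Nat), cs.length - j ≤ d →
    stFindCut cs j < cs.length → separate_terms_isSplit cs ((stFindCut cs j : Nat) : Int) = true := by
  intro d
  induction d with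
  | zero =>
    intro j h hlt
    have := stFindCut_ge cs j
    rw [stFindCut] at hlt
    split at hlt
    · omega
    · omega
  | succ d ih =>
    intro j h hlt
    by_cases hjl : j < cs.length
    · by_cases hs : (cs.getD j ' ' == '+' || cs.getD j ' ' == '-') = true
      · have hk : stFindCut cs j = j := by rw [stFindCut, dif_pos hjl, if_pos hs]
        rw [hk]
        simp only [separate_terms_isSplit]
        rw [PySem.List.pyGetD_natCast]
        simpa using hs
      · have hk : stFindCut cs j = stFindCut cs (j+1) := by rw [stFindCut, dif_pos hjl, if_neg hs]
        rw [hk] at hlt ⊢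
        exact ih (j+1) (by omega) hlt
    · have hk : stFindCut cs j = j := by rw [stFindCut, dif_neg hjl]
      rw [hk] at hlt
      omega

-- B's recursion equals the cut-point characterisation
theorem stGo_eq (cs : List Char) : ∀ (d start : Nat), cs.length - start ≤ d → start < cs.length →
    stGo cs start = zp ((start : Int) :: ((PySem.List.pyRange ((start : Int) + 1) (cs.length : Int)).filter
      (separate_terms_isSplit cs) ++ [(cs.length : Int)])) := by
  intro d
  induction d with
  | zero => intro start h h2; omega
  | succ d ih =>
    intro start h hs
    have hk_ge := stFindCut_ge cs (start + 1)
    have hk_le := stFindCut_le cs (start + 1) (by omega)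
    set k := stFindCut cs (start + 1) with hk
    have hnosplit := stFindCut_no_split cs (cs.length - (start+1)) (start+1) (le_refl _)
    rw [← hk] at hnosplit
    -- split the range at k
    have hrange : PySem.List.pyRange ((start : Int) + 1) (cs.length : Int)
        = PySem.List.pyRange ((start : Int) + 1) (k : Int)
          ++ PySem.List.pyRange (k : Int) (cs.length : Int) := by
      apply PySem.List.pyRange_one_append
      · omega
      · omega
    have hfilter1 : (PySem.List.pyRange ((start : Int) + 1) (k : Int)).filter
        (separate_terms_isSplit cs) = [] := by
      rw [List.filter_eq_nil_iff]
      intro m hm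
      have hb := PySem.List.mem_pyRange_one.mp hm
      have hm0 : (0:Int) ≤ m := by omega
      have hmn : m = ((m.toNat : Nat) : Int) := by omega
      rw [hmn]
      simp only [Bool.not_eq_true]
      exact hnosplit m.toNat (by omega) (by omega)
    rw [stGo]
    split
    · -- k < length : one term, recurse
      rename_i hkl
      have hsplitk := stFindCut_split cs (cs.length - (start+1)) (start+1) (le_refl _) (by rw [← hk]; exact hkl)
      rw [← hk] at hsplitk
      have hrange2 : PySem.List.pyRange ((k : Nat) : Int) (cs.length : Int)
          = (k : Int) :: PySem.List.pyRange ((k : Int) + 1) (cs.length : Int) := by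
        apply PySem.List.pyRange_one_cons
        omega
      rw [hrange, List.filter_append, hfilter1, hrange2, List.filter_cons, if_pos hsplitk,
        List.nil_append]
      rw [ih k (by omega) hkl]
      rfl
    · -- k = length : last term
      rename_i hkl
      have hkeq : k = cs.length := by omega
      have hrange2 : PySem.List.pyRange ((k : Nat) : Int) (cs.length : Int) = [] := by
        apply PySem.List.pyRange_one_eq_nil
        omega
      rw [hrange, List.filter_append, hfilter1, hrange2, List.filter_nil, List.append_nil,
        List.nil_append]
      rfl

-- ===== VERDICT (by name: the statement is the Claim_ definition above) =====
theorem separate_terms_py_spec : Claim_equal_separate_terms_py := by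
  intro exp _
  unfold Spec_separate_terms_py separate_terms_py separate_terms_py_alt
  rcases hcs : exp.toList with _ | ⟨c, _ | ⟨c2, rest⟩⟩
  · simp [PySem.List.pyRange]
  · have h1 : PySem.List.pyRange 0 (1:Int) = [0] := by decide
    have hgo : stGo [c] 0 = [[(0:Int), (1:Int)]] := by
      rw [stGo]
      simp [stFindCut]
    simp [h1, separate_terms_step, hgo]
  · have hA := core c c2 rest
    have hB := stGo_eq (c :: c2 :: rest) ((c :: c2 :: rest).length) 0 (by omega) (by simp)
    simp only [List.length_cons] at hA hB ⊢
    have hne : (rest.length + 1 + 1 : Nat) ≠ 0 := by omega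
    rw [if_pos hne, hA, hB]
    norm_num
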